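-- pv_equiv track=rewrite | github.com/cuckoo711/Manager_dvadmin | backend/jtgame/service_table/utils/spliter.py | parse_template_fields
-- ===== SOURCE A (Python) =====
-- def parse_template_fields(template_fields):
--     fields = template_fields.split(',')
--     field_mappings = []
--     for field in fields:
--         if '&&' in field:
--             field = field.replace('&&', ' ')
--         field_mappings.append(field)
--     return field_mappings
-- ===== SOURCE B (Python) =====
-- def parse_template_fields(template_fields):
--     # single-pass character scanner: builds each field directly, turning '&&' into ' ',
--     # without ever calling split or replace
--     out = []
--     cur = []
--     i = 0
--     n = len(template_fields)
--     while i < n: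
--         c = template_fields[i]
--         if c == ',':
--             out.append(''.join(cur))
--             cur = []
--             i += 1
--         elif c == '&' and i + 1 < n and template_fields[i + 1] == '&':
--             cur.append(' ')
--             i += 2
--         else:
--             cur.append(c)
--             i += 1
--     out.append(''.join(cur))
--     return out
-- ===== Notes on version B (the rewrite author's own statement) =====
-- stated objective: alternative
-- what changed: B is a single-pass character-level scanner that builds each field directly (emitting a field at each ',' and turning each '&&' pair into one space as it goes), with no call to split or replace; correct because '&&' contains no comma, so per-field leftmost replacement equals the in-scan pairing.
import Mathlib
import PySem

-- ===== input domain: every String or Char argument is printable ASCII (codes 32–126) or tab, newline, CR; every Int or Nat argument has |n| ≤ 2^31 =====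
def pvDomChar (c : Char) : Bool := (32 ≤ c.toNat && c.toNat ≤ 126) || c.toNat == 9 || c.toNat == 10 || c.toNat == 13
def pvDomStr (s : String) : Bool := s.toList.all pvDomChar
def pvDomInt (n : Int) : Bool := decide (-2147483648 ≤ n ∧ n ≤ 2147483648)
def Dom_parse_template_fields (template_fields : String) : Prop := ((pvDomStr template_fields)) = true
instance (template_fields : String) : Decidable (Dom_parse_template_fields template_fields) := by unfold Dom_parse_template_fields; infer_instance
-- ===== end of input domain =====

-- B is a single-pass character scanner building each field directly (',' emits a field, each '&&'
-- pair becomes one space), with no split or replace call; same return value (objective: alternative).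

-- ===== PORT A =====
def parse_template_fields (template_fields : String) : List String :=
  -- fields = template_fields.split(',')  (sep "," is nonempty, so split? never returns none)
  let fields := (PySem.Str.split? template_fields ",").getD []
  -- for field in fields: if '&&' in field: field = field.replace('&&', ' '); field_mappings.append(field)
  fields.foldl (fun field_mappings field =>
    field_mappings ++
      [if PySem.Str.isIn "&&" field then PySem.Str.replace field "&&" " " else field]) []

-- ===== PORT B =====
-- the while loop of Source B, one pass with lookahead: cur is the field being built
-- (Python list append = snoc), out the emitted fields (''.join(cur) = String.ofList cur)
def pvScanB : List Char → List Char → List String → List String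
  | [], cur, out => out ++ [String.ofList cur]
  | c :: t, cur, out =>
    if c = ',' then pvScanB t [] (out ++ [String.ofList cur])
    else if c = '&' && t.head? == some '&' then pvScanB t.tail (cur ++ [' ']) out
    else pvScanB t (cur ++ [c]) out
termination_by l _ _ => l.length
decreasing_by
  all_goals simp [List.length_tail]

def parse_template_fields_alt (template_fields : String) : List String :=
  pvScanB template_fields.toList [] []

-- ===== PRECONDITION & SPEC =====
def Spec_parse_template_fields (template_fields : String) (out : List String) : Prop := out = parse_template_fields_alt template_fields
instance (template_fields : String) (out : List String) : Decidable (Spec_parse_template_fields template_fields out) := by unfold Spec_parse_template_fields; infer_instance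

-- ===== CLAIM (what is proved, stated in full; the proofs are below) =====
def Claim_equal_parse_template_fields : Prop := ∀ (template_fields : String), Dom_parse_template_fields template_fields → Spec_parse_template_fields template_fields (parse_template_fields template_fields)

-- ===== LEMMAS AND PROOFS =====

-- pvRepl s = s with every (leftmost, non-overlapping) "&&" replaced by " " — a clean structural
-- recursion the fuel-based PySem.Chars.replace.go is reduced to.
def pvRepl : List Char → List Char
  | [] => []
  | [c] => [c]
  | c :: d :: t => if c = '&' && d = '&' then ' ' :: pvRepl t else c :: pvRepl (d :: t)

def pvSpl : List Char → List (List Char)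
  | [] => [[]]
  | c :: t => if c = ',' then [] :: pvSpl t else (pvSpl t).modifyHead (c :: ·)

lemma replGo (fuel : Nat) (l acc : List Char) (h : l.length ≤ fuel) :
    PySem.Chars.replace.go ['&','&'] [' '] fuel l acc = acc.reverse ++ pvRepl l := by
  induction fuel generalizing l acc with
  | zero =>
    match l, h with
    | [], _ => simp [PySem.Chars.replace.go, pvRepl]
  | succ n ih =>
    match l with
    | [] => simp [PySem.Chars.replace.go, pvRepl]
    | [c] =>
      rw [PySem.Chars.replace.go]
      have hp : List.isPrefixOf ['&','&'] [c] = false := by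
        simp [List.isPrefixOf]
      simp only [hp, Bool.false_eq_true, if_false]
      rw [ih [] (c :: acc) (by simp)]
      simp [pvRepl]
    | c :: d :: t =>
      rw [PySem.Chars.replace.go]
      simp only [List.length_cons] at h
      by_cases hcd : c = '&' ∧ d = '&'
      · obtain ⟨hc, hd⟩ := hcd; subst hc; subst hd
        have hp : List.isPrefixOf ['&','&'] ('&' :: '&' :: t) = true := by
          simp [List.isPrefixOf]
        simp only [hp, if_true]
        rw [show List.drop (List.length ['&','&']) ('&'::'&'::t) = t from rfl]
        rw [ih t _ (by omega)]
        simp [pvRepl]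
      · have hp : List.isPrefixOf ['&','&'] (c :: d :: t) = false := by
          simp only [List.isPrefixOf, Bool.and_true, Bool.and_eq_false_iff, beq_eq_false_iff_ne, ne_eq]
          by_cases hc : c = '&'
          · right; intro hd; exact hcd ⟨hc, hd.symm⟩
          · left; exact fun h => hc h.symm
        simp only [hp, Bool.false_eq_true, if_false]
        rw [ih (d :: t) (c :: acc) (by simp; omega)]
        have : (c = '&' && d = '&') = false := by
          by_cases hc : c = '&' <;> by_cases hd : d = '&' <;> simp [hc, hd]
          · exact hcd ⟨hc, hd⟩
        simp [pvRepl, this]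

lemma pvSpl_ne_nil (l : List Char) : pvSpl l ≠ [] := by
  induction l with
  | nil => simp [pvSpl]
  | cons c t ih =>
    simp only [pvSpl]
    split
    · simp
    · cases h : pvSpl t with
      | nil => exact absurd h ih
      | cons a r => simp [List.modifyHead]

lemma splGo (fuel : Nat) (l cur : List Char) (acc : List (List Char)) (h : l.length < fuel) :
    PySem.Chars.splitOn.go [','] fuel l cur acc =
      acc.reverse ++ (pvSpl l).modifyHead (cur.reverse ++ ·) := by
  induction fuel generalizing l cur acc with
  | zero => omega
  | succ n ih =>
    match l with
    | [] => simp [PySem.Chars.splitOn.go, pvSpl]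
    | c :: t =>
      rw [PySem.Chars.splitOn.go]
      by_cases hc : c = ','
      · subst hc
        have hp : List.isPrefixOf [','] (',' :: t) = true := by simp [List.isPrefixOf]
        simp only [hp, if_true]
        rw [show List.drop (List.length [',']) (','::t) = t from rfl]
        rw [ih t [] _ (by simp at h; omega)]
        simp only [pvSpl, if_true, List.reverse_nil, List.nil_append]
        cases hsp : pvSpl t <;> simp [List.modifyHead]
      · have hp : List.isPrefixOf [','] (c :: t) = false := by
          simp [List.isPrefixOf]; exact fun h => hc h.symm
        simp only [hp, Bool.false_eq_true, if_false]
        rw [ih t (c :: cur) acc (by simp at h; omega)]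
        obtain ⟨a, r, hr⟩ : ∃ a r, pvSpl t = a :: r := by
          cases hsp : pvSpl t with
          | nil => exact absurd hsp (pvSpl_ne_nil t)
          | cons a r => exact ⟨a, r, rfl⟩
        simp [pvSpl, hc, hr, List.modifyHead]

lemma replChar (s : List Char) : PySem.Chars.replace s ['&','&'] [' '] = pvRepl s := by
  rw [PySem.Chars.replace]
  simp only [List.isEmpty_cons, Bool.false_eq_true, if_false]
  rw [replGo s.length s [] le_rfl]
  simp

lemma splChar (s : List Char) : PySem.Chars.splitOn s [','] = pvSpl s := by
  rw [PySem.Chars.splitOn]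
  rw [splGo (s.length + 1) s [] [] (by omega)]
  cases hsp : pvSpl s <;> simp [List.modifyHead]

lemma pvRepl_cons_nonamp (c : Char) (a : List Char)
    (h : c ≠ '&' ∨ a.head? ≠ some '&') : pvRepl (c :: a) = c :: pvRepl a := by
  match a with
  | [] => rfl
  | d :: t =>
    have : (c = '&' && d = '&') = false := by
      rcases h with h | h
      · simp [h]
      · simp only [List.head?_cons, ne_eq, Option.some.injEq] at h
        simp [h]
    rw [pvRepl, this]
    simp

lemma repl_not_infix (f : List Char) (h : ¬ ['&','&'] <:+: f) : pvRepl f = f := by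
  induction f using pvRepl.induct with
  | case1 => rfl
  | case2 c => rfl
  | case3 c d t hcd ih =>
    exfalso
    simp only [Bool.and_eq_true, decide_eq_true_eq] at hcd
    obtain ⟨hc, hd⟩ := hcd
    subst hc; subst hd
    exact h ⟨[], t, rfl⟩
  | case4 c d t hcd ih =>
    rw [pvRepl]
    rw [if_neg hcd]
    simp only [List.cons.injEq, true_and]
    exact ih (fun hi => h (hi.trans (List.suffix_cons c (d::t)).isInfix))

lemma spl_repl (s : List Char) : pvSpl (pvRepl s) = (pvSpl s).map pvRepl := by
  induction s using pvRepl.induct with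
  | case1 => simp [pvRepl, pvSpl]
  | case2 c =>
    rw [show pvRepl [c] = [c] from rfl]
    by_cases hc : c = ','
    · subst hc; simp [pvSpl, pvRepl]
    · simp [pvSpl, hc, pvRepl, List.modifyHead]
  | case3 c d t hcd ih =>
    simp only [Bool.and_eq_true, decide_eq_true_eq] at hcd
    obtain ⟨hc, hd⟩ := hcd; subst hc; subst hd
    obtain ⟨a, r, hr⟩ : ∃ a r, pvSpl t = a :: r := by
      cases hsp : pvSpl t with
      | nil => exact absurd hsp (pvSpl_ne_nil t)
      | cons a r => exact ⟨a, r, rfl⟩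
    rw [show pvRepl ('&'::'&'::t) = ' ' :: pvRepl t from by rw [pvRepl]; simp]
    rw [show pvSpl (' ' :: pvRepl t) = (pvSpl (pvRepl t)).modifyHead (' ' :: ·) from by
      rw [pvSpl]; simp]
    rw [ih, hr]
    rw [show pvSpl ('&'::'&'::t) = ('&'::'&'::a) :: r from by
      rw [pvSpl]; simp only [if_neg (by decide : ¬('&' = ','))]
      rw [pvSpl]; simp only [if_neg (by decide : ¬('&' = ','))]
      rw [hr]; rfl]
    simp only [List.map_cons, List.modifyHead]
    rw [show pvRepl ('&'::'&'::a) = ' ' :: pvRepl a from by rw [pvRepl]; simp]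
  | case4 c d t hcd ih =>
    rw [show pvRepl (c::d::t) = c :: pvRepl (d::t) from by rw [pvRepl, if_neg hcd]]
    by_cases hc : c = ','
    · subst hc
      rw [show ∀ u, pvSpl (',' :: u) = [] :: pvSpl u from fun u => by rw [pvSpl]; simp]
      rw [show pvSpl (',' :: d :: t) = [] :: pvSpl (d :: t) from by rw [pvSpl]; simp]
      rw [ih]; rfl
    · obtain ⟨a, r, hr⟩ : ∃ a r, pvSpl (d :: t) = a :: r := by
        cases hsp : pvSpl (d :: t) with
        | nil => exact absurd hsp (pvSpl_ne_nil _)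
        | cons a r => exact ⟨a, r, rfl⟩
      rw [show pvSpl (c :: pvRepl (d::t)) = (pvSpl (pvRepl (d::t))).modifyHead (c :: ·) from by
        rw [pvSpl]; simp [hc]]
      rw [show pvSpl (c :: d :: t) = (pvSpl (d::t)).modifyHead (c :: ·) from by
        rw [pvSpl]; simp [hc]]
      rw [ih, hr]
      simp only [List.map_cons, List.modifyHead, List.map]
      have hca : pvRepl (c :: a) = c :: pvRepl a := by
        apply pvRepl_cons_nonamp
        by_cases hamp : c = '&'
        · right
          have hd : d ≠ '&' := by
            intro hdd; exact hcd (by simp [hamp, hdd])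
          by_cases hdc : d = ','
          · subst hdc
            rw [show pvSpl (',' :: t) = [] :: pvSpl t from by rw [pvSpl]; simp] at hr
            injection hr with h1 _; rw [← h1]; simp
          · obtain ⟨a', r', hr'⟩ : ∃ a' r', pvSpl t = a' :: r' := by
              cases hsp : pvSpl t with
              | nil => exact absurd hsp (pvSpl_ne_nil _)
              | cons x y => exact ⟨x, y, rfl⟩
            rw [show pvSpl (d :: t) = (pvSpl t).modifyHead (d :: ·) from by
              rw [pvSpl]; simp [hdc], hr'] at hr
            simp only [List.modifyHead] at hr
            injection hr with h1 _
            rw [← h1]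
            simp [hd]
        · left; exact hamp
      rw [hca]

lemma split_comma_eq (s : String) :
    ∃ L, PySem.Str.split? s "," = some L ∧ L.map String.toList = pvSpl s.toList := by
  have h := PySem.Str.split?_map s ","
  rw [show ("," : String).toList = [','] from rfl] at h
  rw [show PySem.Chars.split? s.toList [','] = some (pvSpl s.toList) from by
    rw [PySem.Chars.split?]; simp [splChar]] at h
  cases hs : PySem.Str.split? s "," with
  | none => rw [hs] at h; simp at h
  | some L =>
    rw [hs] at h
    simp only [Option.map_some, Option.some.injEq] at h
    exact ⟨L, rfl, h⟩

lemma spl_head_cons (c : Char) (hc : ¬ c = ',') (x : List Char) :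
    pvSpl (c :: x) = (pvSpl x).modifyHead (c :: ·) := by
  rw [pvSpl]; simp [hc]

lemma scan_inv (l cur : List Char) (out : List String) :
    pvScanB l cur out = out ++ ((pvSpl (pvRepl l)).modifyHead (cur ++ ·)).map String.ofList := by
  induction l, cur, out using pvScanB.induct with
  | case1 cur out => simp [pvScanB, pvRepl, pvSpl, List.modifyHead]
  | case2 t cur out ih =>
    rw [pvScanB, if_pos rfl, ih]
    rw [pvRepl_cons_nonamp ',' t (Or.inl (by decide))]
    rw [show pvSpl (',' :: pvRepl t) = [] :: pvSpl (pvRepl t) from by rw [pvSpl]; simp]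
    obtain ⟨a, r, hr⟩ : ∃ a r, pvSpl (pvRepl t) = a :: r := by
      cases hsp : pvSpl (pvRepl t) with
      | nil => exact absurd hsp (pvSpl_ne_nil _)
      | cons a r => exact ⟨a, r, rfl⟩
    simp [hr, List.modifyHead]
  | case3 c t cur out hc hamp ih =>
    simp only [Bool.and_eq_true, decide_eq_true_eq, beq_iff_eq] at hamp
    obtain ⟨hc8, hh⟩ := hamp
    subst hc8
    obtain ⟨t', ht⟩ : ∃ t', t = '&' :: t' := by
      cases t with
      | nil => simp at hh
      | cons d t' =>
        simp only [List.head?_cons, Option.some.injEq] at hh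
        exact ⟨t', by rw [hh]⟩
    subst ht
    rw [pvScanB, if_neg hc, if_pos (by simp)]
    simp only [List.tail_cons] at ih ⊢
    rw [ih]
    rw [show pvRepl ('&' :: '&' :: t') = ' ' :: pvRepl t' from by rw [pvRepl]; simp]
    rw [spl_head_cons ' ' (by decide)]
    obtain ⟨a, r, hr⟩ : ∃ a r, pvSpl (pvRepl t') = a :: r := by
      cases hsp : pvSpl (pvRepl t') with
      | nil => exact absurd hsp (pvSpl_ne_nil _)
      | cons a r => exact ⟨a, r, rfl⟩
    simp [hr, List.modifyHead]
  | case4 c t cur out hc hamp ih =>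
    rw [pvScanB, if_neg hc, if_neg hamp, ih]
    simp only [Bool.and_eq_true, decide_eq_true_eq, beq_iff_eq, not_and] at hamp
    have hrep : pvRepl (c :: t) = c :: pvRepl t := by
      apply pvRepl_cons_nonamp
      by_cases h8 : c = '&'
      · right; simpa using hamp h8
      · left; exact h8
    rw [hrep, spl_head_cons c hc]
    obtain ⟨a, r, hr⟩ : ∃ a r, pvSpl (pvRepl t) = a :: r := by
      cases hsp : pvSpl (pvRepl t) with
      | nil => exact absurd hsp (pvSpl_ne_nil _)
      | cons a r => exact ⟨a, r, rfl⟩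
    simp [hr, List.modifyHead]

lemma alt_eq (tf : String) :
    parse_template_fields_alt tf = (pvSpl (pvRepl tf.toList)).map String.ofList := by
  rw [parse_template_fields_alt, scan_inv]
  obtain ⟨a, r, hr⟩ : ∃ a r, pvSpl (pvRepl tf.toList) = a :: r := by
    cases hsp : pvSpl (pvRepl tf.toList) with
    | nil => exact absurd hsp (pvSpl_ne_nil _)
    | cons a r => exact ⟨a, r, rfl⟩
  simp [hr, List.modifyHead]

lemma alt_map (tf : String) :
    (parse_template_fields_alt tf).map String.toList = pvSpl (pvRepl tf.toList) := by
  rw [alt_eq, List.map_map]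
  rw [show String.toList ∘ String.ofList = id from funext fun l => String.toList_ofList, List.map_id]

lemma a_map (tf : String) :
    (parse_template_fields tf).map String.toList = pvSpl (pvRepl tf.toList) := by
  obtain ⟨LA, hA, hAT⟩ := split_comma_eq tf
  rw [parse_template_fields, hA]
  simp only [Option.getD_some]
  rw [PySem.List.foldl_append_singleton_eq_map, List.nil_append, List.map_map]
  have hpt : ∀ f : String,
      (String.toList ∘ fun field => if PySem.Str.isIn "&&" field then PySem.Str.replace field "&&" " " else field) f
        = pvRepl f.toList := by
    intro f
    simp only [Function.comp]
    by_cases hin : PySem.Str.isIn "&&" f = true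
    · rw [if_pos hin, PySem.Str.toList_replace]
      exact replChar f.toList
    · rw [if_neg hin]
      refine (repl_not_infix f.toList ?_).symm
      rw [PySem.Str.isIn_eq] at hin
      exact (PySem.Chars.isIn_eq_false_iff _ _).mp (Bool.eq_false_iff.mpr hin ▸ rfl)
  calc LA.map (String.toList ∘ fun field => if PySem.Str.isIn "&&" field then PySem.Str.replace field "&&" " " else field)
      = LA.map (fun f => pvRepl f.toList) := List.map_congr_left (fun f _ => hpt f)
    _ = (LA.map String.toList).map pvRepl := by rw [List.map_map]; rfl
    _ = (pvSpl tf.toList).map pvRepl := by rw [hAT]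
    _ = pvSpl (pvRepl tf.toList) := (spl_repl tf.toList).symm

lemma pv_main (tf : String) : parse_template_fields tf = parse_template_fields_alt tf :=
  List.map_injective_iff.mpr (fun _ _ h => String.toList_inj.mp h)
    ((a_map tf).trans (alt_map tf).symm)

-- ===== VERDICT (by name: the statement is the Claim_ definition above) =====
theorem parse_template_fields_spec : Claim_equal_parse_template_fields := by
  intro template_fields _
  unfold Spec_parse_template_fields
  exact pv_main template_fields
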